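-- pv_equiv track=rewrite | github.com/mantavya0807/CourseCrafter | Data/pretty.py | separate_types
-- ===== SOURCE A (Python) =====
-- def separate_types(types):
--     indicators = {'Mandatory': 0, 'Select': 0, 'Academic_Plan': 0}
--     if isinstance(types, str):
--         # Split by semicolon and strip whitespace
--         types_list = [t.strip() for t in types.split(';')]
--         for t in types_list:
--             if 'Mandatory' in t:
--                 indicators['Mandatory'] = 1
--             if 'Select' in t:
--                 indicators['Select'] = 1
--             if 'Academic Plan' in t:
--                 indicators['Academic_Plan'] = 1
--     return indicators
-- ===== SOURCE B (Python) =====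
-- def separate_types(types):
--     # None of the three search substrings contains ';' or leading/trailing
--     # whitespace, so membership in some stripped ';'-token of the string is
--     # the same as membership in the whole string.
--     is_str = isinstance(types, str)
--     return {
--         'Mandatory': 1 if is_str and 'Mandatory' in types else 0,
--         'Select': 1 if is_str and 'Select' in types else 0,
--         'Academic_Plan': 1 if is_str and 'Academic Plan' in types else 0,
--     }
-- ===== Notes on version B (the rewrite author's own statement) =====
-- stated objective: simpler
-- what changed: B drops A's split-on-';'/strip/loop entirely and tests the three substrings directly against the whole string, which is equivalent because none of the search substrings contains ';' or leading/trailing whitespace.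
import Mathlib
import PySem

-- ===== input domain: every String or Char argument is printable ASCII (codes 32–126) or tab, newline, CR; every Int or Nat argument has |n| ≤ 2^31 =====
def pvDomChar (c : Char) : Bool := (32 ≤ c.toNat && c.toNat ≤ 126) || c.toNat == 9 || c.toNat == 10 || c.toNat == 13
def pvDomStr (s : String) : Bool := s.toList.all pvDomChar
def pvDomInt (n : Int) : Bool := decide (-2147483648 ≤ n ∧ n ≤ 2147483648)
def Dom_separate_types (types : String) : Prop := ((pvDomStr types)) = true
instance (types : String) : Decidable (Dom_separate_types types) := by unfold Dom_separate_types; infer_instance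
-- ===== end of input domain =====

-- B replaces A's split-on-';'/strip-each-token/loop with three direct substring tests on
-- the whole string (equivalent because no search substring contains ';' or edge
-- whitespace): simpler, same cost.

-- ===== PORT A =====
-- the `isinstance(types, str)` guard is always true for a String argument, so the
-- guarded block is ported unconditionally
def separate_types (types : String) : List (String × Int) :=
  let indicators : PySem.Dict String Int :=
    ((PySem.Dict.empty.insert "Mandatory" 0).insert "Select" 0).insert "Academic_Plan" 0
  let types_list : List String :=
    ((PySem.Str.split? types ";").getD []).map (fun t => PySem.Str.strip t)
  let indicators := types_list.foldl (fun d t =>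
    let d := if PySem.Str.isIn "Mandatory" t then d.insert "Mandatory" 1 else d
    let d := if PySem.Str.isIn "Select" t then d.insert "Select" 1 else d
    if PySem.Str.isIn "Academic Plan" t then d.insert "Academic_Plan" 1 else d) indicators
  indicators.items

-- ===== PORT B =====
-- B's `is_str` flag is likewise always true for a String argument
def separate_types_alt (types : String) : List (String × Int) :=
  [("Mandatory", if PySem.Str.isIn "Mandatory" types then (1 : Int) else 0),
   ("Select", if PySem.Str.isIn "Select" types then (1 : Int) else 0),
   ("Academic_Plan", if PySem.Str.isIn "Academic Plan" types then (1 : Int) else 0)]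


-- ===== PRECONDITION & SPEC =====
def Spec_separate_types (types : String) (out : List (String × Int)) : Prop := out = separate_types_alt types
instance (types : String) (out : List (String × Int)) : Decidable (Spec_separate_types types out) := by unfold Spec_separate_types; infer_instance

-- ===== CLAIM (what is proved, stated in full; the proofs are below) =====
def Claim_equal_separate_types : Prop := ∀ (types : String), Dom_separate_types types → Spec_separate_types types (separate_types types)

-- ===== LEMMAS AND PROOFS =====

def pvSplit : List Char → List Char × List (List Char)
  | [] => ([], [])
  | c :: r =>
    let p := pvSplit r
    if c = ';' then ([], p.1 :: p.2) else (c :: p.1, p.2)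

theorem go_eq (fuel : Nat) : ∀ (l cur : List Char) (acc : List (List Char)), l.length ≤ fuel →
    PySem.Chars.splitOn.go [';'] fuel l cur acc
      = acc.reverse ++ (cur.reverse ++ (pvSplit l).1) :: (pvSplit l).2 := by
  induction fuel with
  | zero =>
    intro l cur acc h
    have : l = [] := List.eq_nil_of_length_eq_zero (Nat.le_zero.mp h)
    subst this
    simp [PySem.Chars.splitOn.go, pvSplit]
  | succ f ih =>
    intro l cur acc h
    cases l with
    | nil => simp [PySem.Chars.splitOn.go, pvSplit]
    | cons c rest =>
      have hr : rest.length ≤ f := by simpa using h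
      by_cases hc : c = ';'
      · subst hc
        rw [PySem.Chars.splitOn.go]
        simp only [List.isPrefixOf, List.length_singleton, List.drop_succ_cons,
          List.drop_zero]
        rw [ih rest [] (cur.reverse :: acc) hr]
        simp [pvSplit]
      · rw [PySem.Chars.splitOn.go]
        have hp : [';'].isPrefixOf (c :: rest) = false := by
          simp [List.isPrefixOf_cons₂, Ne.symm hc]
        rw [hp]
        simp only [Bool.false_eq_true, if_false]
        rw [ih rest (c :: cur) acc hr]
        simp [pvSplit, hc]

theorem splitOn_semi (s : List Char) :
    PySem.Chars.splitOn s [';'] = (pvSplit s).1 :: (pvSplit s).2 := by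
  have := go_eq (s.length + 1) s [] [] (Nat.le_succ _)
  simpa [PySem.Chars.splitOn] using this

theorem pvSplit_first_prefix (s : List Char) : (pvSplit s).1 <+: s := by
  induction s with
  | nil => simp [pvSplit]
  | cons c r ih =>
    by_cases hc : c = ';'
    · simp [pvSplit, hc]
    · simpa [pvSplit, hc] using ih

theorem pvSplit_rest_infix (s : List Char) : ∀ t ∈ (pvSplit s).2, t <:+: s := by
  induction s with
  | nil => simp [pvSplit]
  | cons c r ih =>
    intro t ht
    by_cases hc : c = ';'
    · simp only [pvSplit, hc, if_true] at ht
      rcases List.mem_cons.mp ht with h | h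
      · subst h
        exact ((pvSplit_first_prefix r).isInfix).trans ((List.suffix_cons c r).isInfix)
      · exact ((ih t h).trans (List.suffix_cons c r).isInfix)
    · simp only [pvSplit, hc, if_false] at ht
      exact ((ih t ht).trans (List.suffix_cons c r).isInfix)

theorem prefix_pvSplit_first (sub s : List Char) (h : ';' ∉ sub) (hp : sub <+: s) :
    sub <+: (pvSplit s).1 := by
  induction s generalizing sub with
  | nil => simpa [pvSplit] using hp
  | cons c r ih =>
    cases sub with
    | nil => exact List.nil_prefix
    | cons d sub' =>
      rcases List.cons_prefix_cons.mp hp with ⟨rfl, hp'⟩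
      have hd : d ≠ ';' := fun hdd => h (by simp [hdd])
      have := ih sub' (fun hm => h (List.mem_cons_of_mem _ hm)) hp'
      simp only [pvSplit, hd, if_false]
      exact List.cons_prefix_cons.mpr ⟨rfl, this⟩

theorem infix_pvSplit (sub s : List Char) (h : ';' ∉ sub) (hi : sub <:+: s) :
    sub <:+: (pvSplit s).1 ∨ ∃ t ∈ (pvSplit s).2, sub <:+: t := by
  induction s with
  | nil =>
    left
    simpa [pvSplit] using hi
  | cons c r ih =>
    rcases List.infix_cons_iff.mp hi with hp | hr
    · exact Or.inl (prefix_pvSplit_first sub _ h hp).isInfix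
    · rcases ih hr with h1 | ⟨t, ht, h2⟩
      · by_cases hc : c = ';'
        · exact Or.inr ⟨(pvSplit r).1, by simp [pvSplit, hc], h1⟩
        · refine Or.inl (h1.trans ?_)
          simpa [pvSplit, hc] using (List.suffix_cons c (pvSplit r).1).isInfix
      · by_cases hc : c = ';' <;> exact Or.inr ⟨t, by simp [pvSplit, hc, ht], h2⟩

theorem infix_dropWhile (sub l : List Char)
    (h : ∀ c, sub.head? = some c → PySem.Chars.isspace c = false)
    (hi : sub <:+: l) : sub <:+: l.dropWhile PySem.Chars.isspace := by
  induction l with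
  | nil => simpa using hi
  | cons c l' ih =>
    by_cases hc : PySem.Chars.isspace c = true
    · rw [List.dropWhile_cons_of_pos hc]
      rcases List.infix_cons_iff.mp hi with hp | hr
      · cases sub with
        | nil => exact List.nil_infix
        | cons d sub' =>
          rcases List.cons_prefix_cons.mp hp with ⟨rfl, _⟩
          exact absurd hc (by simpa using h d rfl)
      · exact ih hr
    · rw [List.dropWhile_cons_of_neg hc]
      exact hi

theorem infix_rstrip (sub l : List Char)
    (hl : ∀ c, sub.getLast? = some c → PySem.Chars.isspace c = false)
    (hi : sub <:+: l) : sub <:+: PySem.Chars.rstrip l := by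
  rw [PySem.Chars.rstrip, ← List.reverse_infix, List.reverse_reverse]
  apply infix_dropWhile
  · intro c hc
    rw [List.head?_reverse] at hc
    exact hl c hc
  · rw [List.reverse_infix]
    exact hi

theorem lstrip_infix_self (l : List Char) : PySem.Chars.lstrip l <:+: l :=
  (List.dropWhile_suffix _).isInfix

theorem strip_infix_self (l : List Char) : PySem.Chars.strip l <:+: l := by
  rw [PySem.Chars.strip]
  refine ((?_ : PySem.Chars.rstrip (PySem.Chars.lstrip l) <:+: PySem.Chars.lstrip l)).trans
    (lstrip_infix_self l)
  rw [PySem.Chars.rstrip]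
  have := (List.dropWhile_suffix (l := (PySem.Chars.lstrip l).reverse) PySem.Chars.isspace)
  have := List.IsSuffix.reverse this
  simpa using this.isInfix

theorem infix_strip_iff (sub l : List Char)
    (hh : ∀ c, sub.head? = some c → PySem.Chars.isspace c = false)
    (hl : ∀ c, sub.getLast? = some c → PySem.Chars.isspace c = false) :
    sub <:+: PySem.Chars.strip l ↔ sub <:+: l := by
  constructor
  · exact fun h => h.trans (strip_infix_self l)
  · intro h
    rw [PySem.Chars.strip]
    exact infix_rstrip sub _ hl (infix_dropWhile sub l hh h)

theorem any_token_eq (sub s : List Char) (hs : ';' ∉ sub)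
    (hh : ∀ c, sub.head? = some c → PySem.Chars.isspace c = false)
    (hl : ∀ c, sub.getLast? = some c → PySem.Chars.isspace c = false) :
    ((PySem.Chars.splitOn s [';']).map PySem.Chars.strip).any (fun t => PySem.Chars.isIn sub t)
      = PySem.Chars.isIn sub s := by
  rw [Bool.eq_iff_iff]
  simp only [List.any_eq_true, List.mem_map, PySem.Chars.isIn_iff_infix, splitOn_semi]
  constructor
  · rintro ⟨t, ⟨u, hu, rfl⟩, hinf⟩
    have h1 : sub <:+: u := (infix_strip_iff sub u hh hl).mp hinf
    rcases List.mem_cons.mp hu with rfl | hu2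
    · exact h1.trans (pvSplit_first_prefix s).isInfix
    · exact h1.trans (pvSplit_rest_infix s u hu2)
  · intro h
    rcases infix_pvSplit sub s hs h with h1 | ⟨t, ht, h2⟩
    · exact ⟨PySem.Chars.strip (pvSplit s).1, ⟨(pvSplit s).1, by simp, rfl⟩,
        (infix_strip_iff _ _ hh hl).mpr h1⟩
    · exact ⟨PySem.Chars.strip t, ⟨t, by simp [ht], rfl⟩, (infix_strip_iff _ _ hh hl).mpr h2⟩

theorem fold_char (ts : List String) (d : PySem.Dict String Int) (a b c : Int)
    (hd : d = PySem.Dict.mk [("Mandatory", a), ("Select", b), ("Academic_Plan", c)]) :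
    ts.foldl (fun d t =>
      let d := if PySem.Str.isIn "Mandatory" t then d.insert "Mandatory" 1 else d
      let d := if PySem.Str.isIn "Select" t then d.insert "Select" 1 else d
      if PySem.Str.isIn "Academic Plan" t then d.insert "Academic_Plan" 1 else d) d
    = PySem.Dict.mk
        [("Mandatory", if ts.any (fun t => PySem.Str.isIn "Mandatory" t) then 1 else a),
         ("Select", if ts.any (fun t => PySem.Str.isIn "Select" t) then 1 else b),
         ("Academic_Plan", if ts.any (fun t => PySem.Str.isIn "Academic Plan" t) then 1 else c)] := by
  induction ts generalizing d a b c with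
  | nil => simpa using hd
  | cons t ts ih =>
    rw [List.foldl_cons]
    rw [ih _ (if PySem.Str.isIn "Mandatory" t then 1 else a)
          (if PySem.Str.isIn "Select" t then 1 else b)
          (if PySem.Str.isIn "Academic Plan" t then 1 else c) ?_]
    · by_cases h1 : PySem.Str.isIn "Mandatory" t <;>
      by_cases h2 : PySem.Str.isIn "Select" t <;>
      by_cases h3 : PySem.Str.isIn "Academic Plan" t <;>
        simp only [List.any_cons, h1, h2, h3, Bool.true_or, Bool.false_or, if_true, ite_self, Bool.false_eq_true, if_false]
    · subst hd
      by_cases h1 : PySem.Str.isIn "Mandatory" t <;>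
      by_cases h2 : PySem.Str.isIn "Select" t <;>
      by_cases h3 : PySem.Str.isIn "Academic Plan" t <;>
        simp only [h1, h2, h3, if_true, if_false, Bool.false_eq_true] <;> rfl

theorem any_str (sub types : String) (hs : ';' ∉ sub.toList)
    (hh : ∀ c, sub.toList.head? = some c → PySem.Chars.isspace c = false)
    (hl : ∀ c, sub.toList.getLast? = some c → PySem.Chars.isspace c = false) :
    (((PySem.Str.split? types ";").getD []).map (fun t => PySem.Str.strip t)).any
        (fun t => PySem.Str.isIn sub t)
      = PySem.Str.isIn sub types := by
  have hbr := PySem.Str.split?_map types ";"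
  have hch : PySem.Chars.split? types.toList ";".toList
      = some (PySem.Chars.splitOn types.toList [';']) := by
    simp [PySem.Chars.split?]
  cases hsp : PySem.Str.split? types ";" with
  | none =>
    rw [hsp] at hbr
    rw [← hbr] at hch
    simp at hch
  | some L =>
    rw [hsp] at hbr
    simp only [Option.map_some] at hbr
    rw [← hbr] at hch
    have hLl : L.map String.toList = PySem.Chars.splitOn types.toList [';'] :=
      Option.some.inj hch
    simp only [Option.getD_some]
    rw [PySem.Str.isIn_eq, ← any_token_eq sub.toList types.toList hs hh hl, ← hLl]
    simp [List.any_map, PySem.Str.isIn_eq, PySem.Str.toList_strip, Function.comp_def]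

set_option maxRecDepth 4000 in
theorem final (types : String) : separate_types types = separate_types_alt types := by
  have h : separate_types types
      = ((((PySem.Str.split? types ";").getD []).map (fun t => PySem.Str.strip t)).foldl
          (fun d t =>
            let d := if PySem.Str.isIn "Mandatory" t then d.insert "Mandatory" 1 else d
            let d := if PySem.Str.isIn "Select" t then d.insert "Select" 1 else d
            if PySem.Str.isIn "Academic Plan" t then d.insert "Academic_Plan" 1 else d)
          (PySem.Dict.mk [("Mandatory", 0), ("Select", 0), ("Academic_Plan", 0)])).items := rfl
  rw [h, fold_char _ _ 0 0 0 rfl]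
  simp only [separate_types_alt]
  rw [any_str "Mandatory" types (by decide)
        (fun c hc => by cases (show some 'M' = some c from hc); decide)
        (fun c hc => by cases (show some 'y' = some c from hc); decide),
      any_str "Select" types (by decide)
        (fun c hc => by cases (show some 'S' = some c from hc); decide)
        (fun c hc => by cases (show some 't' = some c from hc); decide),
      any_str "Academic Plan" types (by decide)
        (fun c hc => by cases (show some 'A' = some c from hc); decide)
        (fun c hc => by cases (show some 'n' = some c from hc); decide)]

-- ===== VERDICT (by name: the statement is the Claim_ definition above) =====
theorem separate_types_spec : Claim_equal_separate_types := by
  intro types _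
  exact final types
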